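-- pv_equiv track=rewrite | github.com/nitinbhide/svnplot | src/svnplot/util.py | strip_zeros
-- ===== SOURCE A (Python) =====
-- def strip_zeros(dates, data):
--     '''
--     strips the dates with data is zero at start of the list
--     '''
--     filtered_dates = dates
--     filtered_data = data
--     if( len(data) > 0 and data[0] == 0):
--         filtered_dates = []
--         filtered_data = []
--         filter=True
--         for dt, datedata in zip(dates, data):
--             if( filter == True and datedata == 0):
--                 continue
--             filter=False
--             filtered_dates.append(dt)
--             filtered_data.append(datedata)
--     return(filtered_dates, filtered_data)
-- ===== SOURCE B (Python) =====
-- def strip_zeros(dates, data):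
--     '''
--     strips the dates with data is zero at start of the list
--     '''
--     if len(data) > 0 and data[0] == 0:
--         n = min(len(dates), len(data))
--         i = 0
--         while i < n and data[i] == 0:
--             i += 1
--         return (dates[i:n], data[i:n])
--     return (dates, data)
-- ===== Notes on version B (the rewrite author's own statement) =====
-- stated objective: simpler
-- what changed: Replaces the flag-driven element-wise append loop over zip(dates,data) with an index scan for the first nonzero datum followed by two slices bounded by min(len(dates),len(data)).
import Mathlib
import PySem

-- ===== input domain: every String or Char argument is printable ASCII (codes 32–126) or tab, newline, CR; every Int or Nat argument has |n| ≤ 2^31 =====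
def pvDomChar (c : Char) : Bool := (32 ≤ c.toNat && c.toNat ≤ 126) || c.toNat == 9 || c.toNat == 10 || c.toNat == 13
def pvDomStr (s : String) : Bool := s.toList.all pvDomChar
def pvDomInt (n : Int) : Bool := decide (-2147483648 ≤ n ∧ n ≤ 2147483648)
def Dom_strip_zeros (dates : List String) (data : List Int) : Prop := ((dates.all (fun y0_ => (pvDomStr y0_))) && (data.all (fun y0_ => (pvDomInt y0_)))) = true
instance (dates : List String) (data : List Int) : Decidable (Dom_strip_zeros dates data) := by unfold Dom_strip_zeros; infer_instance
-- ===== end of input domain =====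

-- B replaces A's flag-driven append loop over zip(dates,data) with an index scan for the
-- first nonzero datum followed by two slices (objective: simpler decomposition).

-- ===== PORT A =====
-- the 'for dt, datedata in zip(dates, data)' loop with state (filter, filtered_dates, filtered_data)
def stripAloop : List (String × Int) → Bool → List String → List Int → List String × List Int
  | [], _, fdates, fdata => (fdates, fdata)
  | (dt, dd) :: rest, filt, fdates, fdata =>
    if filt = true ∧ dd = 0 then stripAloop rest filt fdates fdata
    else stripAloop rest false (fdates ++ [dt]) (fdata ++ [dd])

def strip_zeros (dates : List String) (data : List Int) : List String × List Int :=
  if 0 < data.length ∧ data.headI = 0 then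
    stripAloop (dates.zip data) true [] []
  else (dates, data)

-- ===== PORT B =====
-- the 'while i < n and data[i] == 0: i += 1' loop of Source B
def stripBscan (data : List Int) (n i : Nat) : Nat :=
  if i < n ∧ PySem.List.pyGet? data (i : Int) = some 0 then
    stripBscan data n (i + 1)
  else i
termination_by n - i
decreasing_by omega

def strip_zeros_alt (dates : List String) (data : List Int) : List String × List Int :=
  if 0 < data.length ∧ data.headI = 0 then
    let n := min dates.length data.length
    let i := stripBscan data n 0
    (PySem.List.slice dates (some (i : Int)) (some (n : Int)),
     PySem.List.slice data (some (i : Int)) (some (n : Int)))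
  else (dates, data)

-- ===== PRECONDITION & SPEC =====
def Spec_strip_zeros (dates : List String) (data : List Int) (out : List String × List Int) : Prop := out = strip_zeros_alt dates data
instance (dates : List String) (data : List Int) (out : List String × List Int) : Decidable (Spec_strip_zeros dates data out) := by unfold Spec_strip_zeros; infer_instance

-- ===== CLAIM (what is proved, stated in full; the proofs are below) =====
def Claim_equal_strip_zeros : Prop := ∀ (dates : List String) (data : List Int), Dom_strip_zeros dates data → Spec_strip_zeros dates data (strip_zeros dates data)

-- ===== LEMMAS AND PROOFS =====

-- number of leading zeros of a list of ints (proof-only helper)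
def lz (l : List Int) : Nat := (l.takeWhile (fun x => x == 0)).length

lemma lz_nil : lz [] = 0 := rfl

lemma lz_cons (x : Int) (l : List Int) :
    lz (x :: l) = if x = 0 then 1 + lz l else 0 := by
  unfold lz
  by_cases h : x = 0
  · simp [List.takeWhile, h, Nat.add_comm]
  · have hb : (x == 0) = false := by simp [h]
    simp [List.takeWhile, hb, h]

-- the filter=false phase of A appends everything remaining
lemma stripAloop_false (l : List (String × Int)) :
    ∀ (acc1 : List String) (acc2 : List Int),
      stripAloop l false acc1 acc2 = (acc1 ++ l.map Prod.fst, acc2 ++ l.map Prod.snd) := by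
  induction l with
  | nil => intro acc1 acc2; simp [stripAloop]
  | cons p rest ih =>
    intro acc1 acc2
    obtain ⟨dt, dd⟩ := p
    simp [stripAloop, ih]

lemma zip_map_fst (a : List String) : ∀ b : List Int,
    (a.zip b).map Prod.fst = a.take (min a.length b.length) := by
  induction a with
  | nil => intro b; simp
  | cons x xs ih =>
    intro b
    cases b with
    | nil => simp
    | cons y ys => simp [List.zip_cons_cons, ih ys, Nat.succ_min_succ]

lemma zip_map_snd (a : List String) : ∀ b : List Int,
    (a.zip b).map Prod.snd = b.take (min a.length b.length) := by
  induction a with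
  | nil => intro b; simp
  | cons x xs ih =>
    intro b
    cases b with
    | nil => simp
    | cons y ys => simp [List.zip_cons_cons, ih ys, Nat.succ_min_succ]

-- the filter=true phase of A, characterised by leading-zero count of the zipped prefix
lemma stripAloop_true (dates : List String) : ∀ (data : List Int),
    stripAloop (dates.zip data) true [] [] =
      ((dates.take (min dates.length data.length)).drop (lz (data.take (min dates.length data.length))),
       (data.take (min dates.length data.length)).drop (lz (data.take (min dates.length data.length)))) := by
  induction dates with
  | nil => intro data; simp [stripAloop]
  | cons d ds ih =>
    intro data
    cases data with
    | nil => simp [stripAloop]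
    | cons x xs =>
      by_cases hx : x = 0
      · subst hx
        simp only [List.zip_cons_cons, stripAloop]
        rw [if_pos (⟨trivial, trivial⟩ : True ∧ True)]
        rw [ih xs]
        simp [Nat.succ_min_succ, lz_cons, Nat.add_comm]
      · simp only [List.zip_cons_cons, stripAloop]
        rw [if_neg (by simp [hx]), stripAloop_false, zip_map_fst, zip_map_snd]
        simp [Nat.succ_min_succ, lz_cons, hx]

-- the index scan of B computes the leading-zero count
lemma scan_eq : ∀ (k : Nat) (data : List Int) (n i : Nat), n - i = k → n ≤ data.length →
    stripBscan data n i = i + lz ((data.drop i).take (n - i)) := by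
  intro k
  induction k with
  | zero =>
    intro data n i hk hn
    unfold stripBscan
    rw [if_neg (by omega)]
    simp [hk, lz_nil]
  | succ k ih =>
    intro data n i hk hn
    have hi : i < n := by omega
    have hilen : i < data.length := by omega
    have hdrop : data.drop i = data[i] :: data.drop (i + 1) := List.drop_eq_getElem_cons hilen
    have htake : (data.drop i).take (n - i) = data[i] :: (data.drop (i + 1)).take (n - (i + 1)) := by
      rw [hdrop]
      have : n - i = (n - (i + 1)) + 1 := by omega
      rw [this, List.take_succ_cons]
    unfold stripBscan
    by_cases h0 : data[i] = (0 : Int)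
    · have hc : i < n ∧ PySem.List.pyGet? data (i : Int) = some 0 :=
        ⟨hi, by simp [PySem.List.pyGet?_natCast, List.getElem?_eq_getElem hilen, h0]⟩
      rw [if_pos hc]
      rw [ih data n (i + 1) (by omega) hn, htake, lz_cons, if_pos h0]
      omega
    · rw [if_neg (by
        rintro ⟨-, hget⟩
        rw [PySem.List.pyGet?_natCast, List.getElem?_eq_getElem hilen] at hget
        exact h0 (by injection hget)), htake, lz_cons, if_neg h0]
      simp

lemma strip_eq (dates : List String) (data : List Int) :
    strip_zeros dates data = strip_zeros_alt dates data := by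
  unfold strip_zeros strip_zeros_alt
  by_cases hg : 0 < data.length ∧ data.headI = 0
  · rw [if_pos hg, if_pos hg]
    set n := min dates.length data.length with hn
    have hnlen : n ≤ data.length := by omega
    have hscan : stripBscan data n 0 = lz (data.take n) := by
      have := scan_eq (n - 0) data n 0 rfl hnlen
      simpa using this
    rw [stripAloop_true]
    simp only [← hn, hscan, PySem.List.slice_natCast, ← List.drop_take]
  · rw [if_neg hg, if_neg hg]

-- ===== VERDICT (by name: the statement is the Claim_ definition above) =====
theorem strip_zeros_spec : Claim_equal_strip_zeros := by
  intro dates data _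
  unfold Spec_strip_zeros
  exact strip_eq dates data
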